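-- pv_equiv track=rewrite | github.com/redhat-documentation/redhat-docs-agent-tools | plugins/cqa-tools/skills/cqa-assess/scripts/check-conscious-language.py | parse_code_block_lines
-- ===== SOURCE A (Python) =====
-- def parse_code_block_lines(lines):
--     """Return a set of line indices inside code/literal blocks.
--
--     Tracks a single block state so that delimiters nested inside another
--     block type (e.g., ``----`` inside a ``....`` block) are treated as
--     content rather than toggling a second block.
--     """
--     code_lines = set()
--     current_block = None  # None, "source", or "literal"
--     for i, line in enumerate(lines):
--         stripped = line.strip()
--         is_source_delim = (
--             stripped.startswith("----") and len(stripped) >= 4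
--             and all(c == "-" for c in stripped)
--         )
--         is_literal_delim = (
--             stripped.startswith("....") and len(stripped) >= 4
--             and all(c == "." for c in stripped)
--         )
--         if is_source_delim and current_block in (None, "source"):
--             code_lines.add(i)
--             current_block = None if current_block == "source" else "source"
--             continue
--         if is_literal_delim and current_block in (None, "literal"):
--             code_lines.add(i)
--             current_block = None if current_block == "literal" else "literal"
--             continue
--         if current_block is not None:
--             code_lines.add(i)
--     return code_lines
-- ===== SOURCE B (Python) =====
-- def _delim_type(line):
--     s = line.strip()
--     if len(s) >= 4:
--         if all(c == "-" for c in s):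
--             return "source"
--         if all(c == "." for c in s):
--             return "literal"
--     return None
--
--
-- def parse_code_block_lines(lines):
--     """Return a set of line indices inside code/literal blocks.
--
--     Jump-based scan: at each opening delimiter, find the next delimiter of
--     the SAME type (or end of file) and mark the whole range inclusively.
--     """
--     result = set()
--     n = len(lines)
--     i = 0
--     while i < n:
--         t = _delim_type(lines[i])
--         if t is None:
--             i += 1
--             continue
--         close = i + 1
--         while close < n and _delim_type(lines[close]) != t:
--             close += 1
--         if close == n:
--             close = n - 1
--         result.update(range(i, close + 1))
--         i = close + 1
--     return result
-- ===== Notes on version B (the rewrite author's own statement) =====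
-- stated objective: alternative
-- what changed: A is a line-by-line state machine carrying a current-block flag across every line; B is a jump scan that, at each delimiter line, searches forward for the matching same-type close (or end of file) and marks the whole inclusive range at once, resuming after it.
import Mathlib
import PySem

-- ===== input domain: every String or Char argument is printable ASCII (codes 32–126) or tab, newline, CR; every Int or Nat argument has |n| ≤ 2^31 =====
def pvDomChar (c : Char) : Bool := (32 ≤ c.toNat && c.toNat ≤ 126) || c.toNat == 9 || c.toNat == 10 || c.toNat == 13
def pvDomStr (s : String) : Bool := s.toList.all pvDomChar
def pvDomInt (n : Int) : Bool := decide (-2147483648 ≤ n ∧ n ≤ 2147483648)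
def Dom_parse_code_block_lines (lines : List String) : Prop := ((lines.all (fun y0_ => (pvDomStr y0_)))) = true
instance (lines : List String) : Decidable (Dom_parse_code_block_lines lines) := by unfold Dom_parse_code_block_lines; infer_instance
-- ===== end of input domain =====

-- B replaces A's line-by-line block-state machine with a jump scan: at each delimiter it finds
-- the matching close directly and marks the whole range at once (objective: alternative).

-- ===== PORT A =====
def pvIsSourceDelim (stripped : String) : Bool :=
  PySem.Str.startswith stripped "----" && decide (4 ≤ PySem.Str.len stripped)
    && stripped.toList.all (fun c => c == '-')

def pvIsLiteralDelim (stripped : String) : Bool :=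
  PySem.Str.startswith stripped "...." && decide (4 ≤ PySem.Str.len stripped)
    && stripped.toList.all (fun c => c == '.')

def pvAStep (st : PySem.Set Int × Option String) (p : Int × String) :
    PySem.Set Int × Option String :=
  let code_lines := st.1
  let current_block := st.2
  let i := p.1
  let line := p.2
  let stripped := PySem.Str.strip line
  if pvIsSourceDelim stripped && (current_block == none || current_block == some "source") then
    (PySem.Set.add code_lines i, if current_block == some "source" then none else some "source")
  else if pvIsLiteralDelim stripped && (current_block == none || current_block == some "literal") then
    (PySem.Set.add code_lines i, if current_block == some "literal" then none else some "literal")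
  else if current_block.isSome then
    (PySem.Set.add code_lines i, current_block)
  else
    (code_lines, current_block)

def parse_code_block_lines (lines : List String) : List Int :=
  ((PySem.List.enumerate lines).foldl pvAStep (PySem.Set.empty, none)).1

-- ===== PORT B =====
def pvDelimType (line : String) : Option String :=
  let s := PySem.Str.strip line
  if 4 ≤ PySem.Str.len s then
    if s.toList.all (fun c => c == '-') then some "source"
    else if s.toList.all (fun c => c == '.') then some "literal"
    else none
  else none

-- Source B's inner `while close < n and _delim_type(lines[close]) != t` scan, as an offset in the suffix
def pvFindClose (t : String) : List String → Option Nat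
  | [] => none
  | l :: ls => if pvDelimType l == some t then some 0 else (pvFindClose t ls).map (· + 1)

set_option maxHeartbeats 1000000 in
def pvAltLoop (i : Int) (ls : List String) (res : PySem.Set Int) : PySem.Set Int :=
  match ls with
  | [] => res
  | l :: rest =>
    match pvDelimType l with
    | none => pvAltLoop (i + 1) rest res
    | some t =>
      match pvFindClose t rest with
      | some k =>
          pvAltLoop (i + k + 2) (rest.drop (k + 1))
            ((PySem.List.pyRange i (i + k + 2) 1).foldl PySem.Set.add res)
      | none => (PySem.List.pyRange i (i + (rest.length : Int) + 1) 1).foldl PySem.Set.add res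
termination_by ls.length
decreasing_by all_goals simp [List.length_drop]

def parse_code_block_lines_alt (lines : List String) : List Int :=
  pvAltLoop 0 lines PySem.Set.empty

-- ===== PRECONDITION & SPEC =====
def Spec_parse_code_block_lines (lines : List String) (out : List Int) : Prop := out = parse_code_block_lines_alt lines
instance (lines : List String) (out : List Int) : Decidable (Spec_parse_code_block_lines lines out) := by unfold Spec_parse_code_block_lines; infer_instance

-- ===== CLAIM (what is proved, stated in full; the proofs are below) =====
def Claim_equal_parse_code_block_lines : Prop := ∀ (lines : List String), Dom_parse_code_block_lines lines → Spec_parse_code_block_lines lines (parse_code_block_lines lines)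

-- ===== LEMMAS AND PROOFS =====

lemma pvStartsRep (s p : String) (ch : Char) (hp : p.toList = List.replicate 4 ch)
    (h4 : 4 ≤ s.toList.length)
    (hall : s.toList.all (fun c => c == ch) = true) :
    PySem.Str.startswith s p = true := by
  rw [PySem.Str.startswith_eq, PySem.Chars.startswith_iff]
  have hrep : s.toList = List.replicate s.toList.length ch :=
    List.eq_replicate_of_mem (by simpa [List.all_eq_true] using hall)
  rw [hp, hrep, List.prefix_iff_eq_take]
  have h4x : 4 ≤ s.length := by simpa using h4
  simp [List.take_replicate, Nat.min_eq_left h4x]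

lemma pvNotBoth (s : String) (h4 : 4 ≤ s.toList.length)
    (hd : s.toList.all (fun c => c == '-') = true) :
    s.toList.all (fun c => c == '.') = false := by
  rcases hl : s.toList with _ | ⟨c, cs⟩
  · simp [hl] at h4
  · simp only [List.all_eq_true, hl] at hd ⊢
    simp only [List.all_cons, Bool.and_eq_false_iff]
    left
    have := hd c (by simp)
    simp_all

lemma pvClassify (line : String) :
    (pvDelimType line = some "source" ∧ pvIsSourceDelim (PySem.Str.strip line) = true ∧
      pvIsLiteralDelim (PySem.Str.strip line) = false)
    ∨ (pvDelimType line = some "literal" ∧ pvIsSourceDelim (PySem.Str.strip line) = false ∧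
      pvIsLiteralDelim (PySem.Str.strip line) = true)
    ∨ (pvDelimType line = none ∧ pvIsSourceDelim (PySem.Str.strip line) = false ∧
      pvIsLiteralDelim (PySem.Str.strip line) = false) := by
  have hsrc : ("----" : String).toList = List.replicate 4 '-' := by decide
  have hlit : ("...." : String).toList = List.replicate 4 '.' := by decide
  have hdt : pvDelimType line =
      (let s := PySem.Str.strip line
       if 4 ≤ PySem.Str.len s then
         if s.toList.all (fun c => c == '-') then some "source"
         else if s.toList.all (fun c => c == '.') then some "literal"
         else none
       else none) := rfl
  set s := PySem.Str.strip line with hs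
  by_cases h4 : 4 ≤ PySem.Str.len s
  · have h4' : 4 ≤ s.toList.length := by
      rw [PySem.Str.len_eq] at h4; exact_mod_cast h4
    by_cases hd : s.toList.all (fun c => c == '-') = true
    · left
      have hnb := pvNotBoth s h4' hd
      refine ⟨by rw [hdt]; simp only [← hs, if_pos h4, if_pos hd], ?_, ?_⟩
      · unfold pvIsSourceDelim
        rw [pvStartsRep s "----" '-' hsrc h4' hd, hd, decide_eq_true h4]; rfl
      · unfold pvIsLiteralDelim
        rw [hnb, Bool.and_false]
    · by_cases hp : s.toList.all (fun c => c == '.') = true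
      · right; left
        refine ⟨by rw [hdt]; simp only [← hs, if_pos h4, if_neg hd, if_pos hp], ?_, ?_⟩
        · unfold pvIsSourceDelim
          rw [Bool.not_eq_true] at hd
          rw [hd, Bool.and_false]
        · unfold pvIsLiteralDelim
          rw [pvStartsRep s "...." '.' hlit h4' hp, hp, decide_eq_true h4]; rfl
      · right; right
        refine ⟨by rw [hdt]; simp only [← hs, if_pos h4, if_neg hd, if_neg hp], ?_, ?_⟩
        · unfold pvIsSourceDelim
          rw [Bool.not_eq_true] at hd
          rw [hd, Bool.and_false]
        · unfold pvIsLiteralDelim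
          rw [Bool.not_eq_true] at hp
          rw [hp, Bool.and_false]
  · right; right
    have h4f : decide (4 ≤ PySem.Str.len s) = false := decide_eq_false h4
    refine ⟨by rw [hdt]; simp only [← hs, if_neg h4], ?_, ?_⟩
    · unfold pvIsSourceDelim
      rw [h4f, Bool.and_false, Bool.false_and]
    · unfold pvIsLiteralDelim
      rw [h4f, Bool.and_false, Bool.false_and]

lemma pvDelim_cases (line : String) :
    pvDelimType line = none ∨ pvDelimType line = some "source" ∨ pvDelimType line = some "literal" := by
  rcases pvClassify line with ⟨h, _⟩ | ⟨h, _⟩ | ⟨h, _⟩ <;> simp [h]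

lemma pvStep_content (t : String) (res : PySem.Set Int) (i : Int) (line : String)
    (ht : t = "source" ∨ t = "literal") (h : pvDelimType line ≠ some t) :
    pvAStep (res, some t) (i, line) = (PySem.Set.add res i, some t) := by
  rcases pvClassify line with ⟨hdt, h1, h2⟩ | ⟨hdt, h1, h2⟩ | ⟨hdt, h1, h2⟩ <;>
    rcases ht with ht | ht <;> subst ht <;>
    simp_all [pvAStep]

lemma pvStep_close (t : String) (res : PySem.Set Int) (i : Int) (line : String)
    (h : pvDelimType line = some t) :
    pvAStep (res, some t) (i, line) = (PySem.Set.add res i, none) := by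
  rcases pvClassify line with ⟨hdt, h1, h2⟩ | ⟨hdt, h1, h2⟩ | ⟨hdt, h1, h2⟩ <;>
    rw [hdt] at h <;> simp_all [pvAStep]

lemma pvStep_open (t : String) (res : PySem.Set Int) (i : Int) (line : String)
    (h : pvDelimType line = some t) :
    pvAStep (res, none) (i, line) = (PySem.Set.add res i, some t) := by
  rcases pvClassify line with ⟨hdt, h1, h2⟩ | ⟨hdt, h1, h2⟩ | ⟨hdt, h1, h2⟩ <;>
    rw [hdt] at h <;> simp_all [pvAStep]

lemma pvStep_skip (res : PySem.Set Int) (i : Int) (line : String)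
    (h : pvDelimType line = none) :
    pvAStep (res, none) (i, line) = (res, none) := by
  rcases pvClassify line with ⟨hdt, h1, h2⟩ | ⟨hdt, h1, h2⟩ | ⟨hdt, h1, h2⟩ <;>
    rw [hdt] at h <;> simp_all [pvAStep]

lemma pvSeg (t : String) (ht : t = "source" ∨ t = "literal") (ls : List String) :
    ∀ (j : Int) (res : PySem.Set Int),
    ((PySem.List.enumerate ls j).foldl pvAStep (res, some t)) =
      (match pvFindClose t ls with
       | some k =>
          ((PySem.List.enumerate (ls.drop (k + 1)) (j + (k : Int) + 1)).foldl pvAStep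
            ((PySem.List.pyRange j (j + (k : Int) + 1) 1).foldl PySem.Set.add res, none))
       | none =>
          ((PySem.List.pyRange j (j + (ls.length : Int)) 1).foldl PySem.Set.add res, some t)) := by
  induction ls with
  | nil =>
    intro j res
    simp [pvFindClose, PySem.List.pyRange_one_eq_nil (by omega : (j:Int) ≤ j)]
  | cons l ls ih =>
    intro j res
    rw [PySem.List.enumerate_cons, List.foldl_cons]
    by_cases hl : pvDelimType l = some t
    · have hclose : pvFindClose t (l :: ls) = some 0 := by simp [pvFindClose, hl]
      rw [pvStep_close t res j l hl, hclose]
      simp [PySem.List.pyRange_one_singleton]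
    · have hmap : pvFindClose t (l :: ls) = (pvFindClose t ls).map (· + 1) := by
        simp [pvFindClose, hl]
      rw [pvStep_content t res j l ht hl, ih (j+1) (PySem.Set.add res j), hmap]
      cases hfc : pvFindClose t ls with
      | some k =>
        simp only [Option.map_some]
        have hidx : j + ((k+1:Nat):Int) + 1 = j + 1 + (k:Int) + 1 := by push_cast; ring
        show _ = (List.foldl pvAStep
            (List.foldl PySem.Set.add res (PySem.List.pyRange j (j + ((k+1:Nat):Int) + 1)), none)
            (PySem.List.enumerate (List.drop (k + 1 + 1) (l :: ls)) (j + ((k+1:Nat):Int) + 1)))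
        rw [List.drop_succ_cons, hidx,
          PySem.List.pyRange_one_cons (show (j:Int) < j + 1 + (k:Int) + 1 by omega),
          List.foldl_cons]
      | none =>
        simp only [Option.map_none]
        show _ = ((PySem.List.pyRange j (j + ((l :: ls).length : Int)) 1).foldl PySem.Set.add res,
          some t)
        have hidx : j + (((l::ls).length:Nat):Int) = j + 1 + (ls.length:Int) := by
          simp; push_cast; ring
        rw [hidx,
          PySem.List.pyRange_one_cons (show (j:Int) < j + 1 + (ls.length:Int) by omega),
          List.foldl_cons]

set_option maxHeartbeats 1000000 in
lemma pvMain : ∀ (n : Nat) (ls : List String) (j : Int) (res : PySem.Set Int),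
    ls.length ≤ n →
    ((PySem.List.enumerate ls j).foldl pvAStep (res, none)).1 = pvAltLoop j ls res := by
  intro n
  induction n with
  | zero =>
    intro ls j res h
    have : ls = [] := List.eq_nil_of_length_eq_zero (Nat.le_zero.mp h)
    subst this
    simp [pvAltLoop]
  | succ n ih =>
    intro ls j res h
    cases ls with
    | nil => simp [pvAltLoop]
    | cons l ls =>
      rw [PySem.List.enumerate_cons, List.foldl_cons]
      have hcase : pvDelimType l = none ∨
          ∃ t, (t = "source" ∨ t = "literal") ∧ pvDelimType l = some t := by
        rcases pvDelim_cases l with hl | hl | hl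
        · exact Or.inl hl
        · exact Or.inr ⟨"source", Or.inl rfl, hl⟩
        · exact Or.inr ⟨"literal", Or.inr rfl, hl⟩
      rcases hcase with hl | ⟨t, ht, hl⟩
      · rw [pvStep_skip res j l hl, pvAltLoop]
        simp only [hl]
        exact ih ls (j+1) res (by simpa using h)
      · rw [pvStep_open t res j l hl, pvSeg t ht ls (j+1) (PySem.Set.add res j), pvAltLoop]
        simp only [hl]
        cases hfc : pvFindClose t ls with
        | some k =>
          simp only [hfc]
          have hidx : j + 1 + (k:Int) + 1 = j + (k:Int) + 2 := by ring
          rw [hidx, ih (ls.drop (k+1)) (j + (k:Int) + 2)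
            ((PySem.List.pyRange (j+1) (j + (k:Int) + 2) 1).foldl PySem.Set.add (PySem.Set.add res j))
            (by simp at h ⊢; omega)]
          congr 1
          rw [PySem.List.pyRange_one_cons (show (j:Int) < j + (k:Int) + 2 by omega),
            List.foldl_cons]
        | none =>
          simp only [hfc]
          show ((PySem.List.pyRange (j+1) (j + 1 + (ls.length:Int)) 1).foldl PySem.Set.add
            (PySem.Set.add res j), some t).1 = _
          have hidx : j + 1 + (ls.length:Int) = j + (ls.length:Int) + 1 := by ring
          rw [hidx]
          rw [PySem.List.pyRange_one_cons (show (j:Int) < j + (ls.length:Int) + 1 by omega),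
            List.foldl_cons]

-- ===== VERDICT (by name: the statement is the Claim_ definition above) =====
theorem parse_code_block_lines_spec : Claim_equal_parse_code_block_lines := by
  intro lines _
  unfold Spec_parse_code_block_lines parse_code_block_lines parse_code_block_lines_alt
  exact pvMain lines.length lines 0 PySem.Set.empty le_rfl
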